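-- pv_equiv track=rewrite | github.com/JayantGupta77/python | negative_product.py | product_of_negatives
-- ===== SOURCE A (Python) =====
-- def product_of_negatives(numbers):
--
--   negative_product = 1
--   found_negative = False
--
--   for num in numbers:
--     if num < 0:
--       negative_product *= num
--       found_negative = True
--
--   return negative_product if found_negative else 1
-- ===== SOURCE B (Python) =====
-- def product_of_negatives(numbers):
--   xs = sorted(numbers)
--   p = 1
--   i = 0
--   while i < len(xs) and xs[i] < 0:
--     p *= xs[i]
--     i += 1
--   return p
-- ===== Notes on version B (the rewrite author's own statement) =====
-- stated objective: alternative
-- what changed: Sorts the list so all negatives form a prefix, then multiplies only that prefix with an early-terminating scan, instead of A's single filter-and-multiply pass with a found_negative flag.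
import Mathlib
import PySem

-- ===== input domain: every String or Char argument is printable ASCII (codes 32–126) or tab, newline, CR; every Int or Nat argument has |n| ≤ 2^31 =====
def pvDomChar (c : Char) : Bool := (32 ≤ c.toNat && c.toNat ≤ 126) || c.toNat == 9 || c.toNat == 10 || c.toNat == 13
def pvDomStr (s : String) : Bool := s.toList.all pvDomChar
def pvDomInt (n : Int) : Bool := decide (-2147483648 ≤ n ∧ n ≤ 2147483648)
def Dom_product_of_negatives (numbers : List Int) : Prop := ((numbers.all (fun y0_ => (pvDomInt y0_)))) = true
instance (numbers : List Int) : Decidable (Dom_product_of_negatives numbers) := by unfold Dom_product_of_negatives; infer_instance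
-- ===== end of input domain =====

-- B sorts the list so the negatives form a prefix, then multiplies that prefix with an
-- early-terminating scan; a genuinely different (sort-based) strategy, not claimed faster.

-- ===== PORT A =====
-- loop carries (negative_product, found_negative); final conditional return as in A
def product_of_negatives (numbers : List Int) : Int :=
  let st := numbers.foldl
    (fun (s : Int × Bool) num =>
      if num < 0 then (s.1 * num, true) else s)
    (1, false)
  if st.2 then st.1 else 1

-- ===== PORT B =====
-- B's while loop: multiply while the current (sorted) element is negative, then stop
def pvNegPrefixProd : List Int → Int → Int
  | [], p => p
  | x :: t, p => if x < 0 then pvNegPrefixProd t (p * x) else p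

def product_of_negatives_alt (numbers : List Int) : Int :=
  pvNegPrefixProd (PySem.List.sorted numbers (fun x => x) false) 1

-- ===== PRECONDITION & SPEC =====
def Spec_product_of_negatives (numbers : List Int) (out : Int) : Prop := out = product_of_negatives_alt numbers
instance (numbers : List Int) (out : Int) : Decidable (Spec_product_of_negatives numbers out) := by unfold Spec_product_of_negatives; infer_instance

-- ===== CLAIM (what is proved, stated in full; the proofs are below) =====
def Claim_equal_product_of_negatives : Prop := ∀ (numbers : List Int), Dom_product_of_negatives numbers → Spec_product_of_negatives numbers (product_of_negatives numbers)

-- ===== LEMMAS AND PROOFS =====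

-- A's loop state: product component equals acc times the product of the filtered tail
theorem pv_loop_prod (l : List Int) : ∀ (a : Int) (b : Bool),
    (l.foldl (fun (s : Int × Bool) num => if num < 0 then (s.1 * num, true) else s) (a, b)).1
      = (l.filter (fun n => n < 0)).foldl (fun x y => x * y) a := by
  induction l with
  | nil => intro a b; simp
  | cons h t ih =>
    intro a b
    by_cases hlt : h < 0 <;> simp [hlt, ih]

-- when the flag ends false, no element was negative
theorem pv_loop_flag (l : List Int) : ∀ (a : Int) (b : Bool),
    (l.foldl (fun (s : Int × Bool) num => if num < 0 then (s.1 * num, true) else s) (a, b)).2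
      = (b || l.any (fun n => decide (n < 0))) := by
  induction l with
  | nil => intro a b; simp
  | cons h t ih =>
    intro a b
    by_cases hlt : h < 0 <;> simp [hlt, ih]

theorem pv_no_neg_filter (l : List Int) (h : l.any (fun n => decide (n < 0)) = false) :
    l.filter (fun n => n < 0) = [] := by
  rw [List.filter_eq_nil_iff]
  intro x hx
  simp only [List.any_eq_false] at h
  simpa using h x hx

-- on a sorted (Pairwise ≤) list, B's early-terminating scan computes acc * product of the negatives
theorem pv_scan_sorted (l : List Int) (hs : l.Pairwise (fun a b => a ≤ b)) :
    ∀ (p : Int), pvNegPrefixProd l p = (l.filter (fun n => n < 0)).foldl (fun x y => x * y) p := by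
  induction l with
  | nil => intro p; simp [pvNegPrefixProd]
  | cons x t ih =>
    intro p
    rcases List.pairwise_cons.mp hs with ⟨hx, ht⟩
    by_cases hlt : x < 0
    · simp [pvNegPrefixProd, hlt, ih ht]
    · have hfil : t.filter (fun n => n < 0) = [] := by
        rw [List.filter_eq_nil_iff]
        intro y hy
        have := hx y hy
        simp only [decide_eq_true_eq]
        omega
      simp [pvNegPrefixProd, hlt, hfil]

-- foldl mul over either filtered list is the same: they are permutations of each other
theorem pv_perm_foldl (numbers : List Int) :
    ((PySem.List.sorted numbers (fun x => x) false).filter (fun n => n < 0)).foldl (fun x y => x * y) (1 : Int)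
      = (numbers.filter (fun n => n < 0)).foldl (fun x y => x * y) (1 : Int) := by
  have hperm : ((PySem.List.sorted numbers (fun x => x) false).filter (fun n => n < 0)).Perm
      (numbers.filter (fun n => n < 0)) :=
    (PySem.List.sorted_perm numbers (fun x => x) false).filter _
  have := hperm.prod_eq
  simpa [List.prod_eq_foldl] using this

-- ===== VERDICT (by name: the statement is the Claim_ definition above) =====
theorem product_of_negatives_spec : Claim_equal_product_of_negatives := by
  intro numbers _
  unfold Spec_product_of_negatives product_of_negatives product_of_negatives_alt
  rw [pv_scan_sorted _ (by
        simpa using PySem.List.sorted_pairwise numbers (fun x => x)),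
      pv_perm_foldl]
  by_cases hany : numbers.any (fun n => decide (n < 0)) = true
  · simp [pv_loop_flag, hany, pv_loop_prod]
  · simp only [Bool.not_eq_true] at hany
    simp [pv_loop_flag, hany, pv_no_neg_filter numbers hany]
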